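-- pv_equiv track=rewrite | github.com/shhuan1989/algorithms | codeforces/543A.py | solve
-- ===== SOURCE A (Python) =====
-- def solve(N, A, M, bugs, MOD):
--     dp = [[[0 for _ in range(bugs + 1)] for _ in range(M + 1)] for _ in range(2)]
--     for j in range(1, M + 1):
--         if A[0] * j <= bugs:
--             dp[1][j][A[0] * j] = 1
--     dp[1][0][0] = 1
--     dp[0][0][0] = 1
--     for i in range(2, N + 1):
--         for j in range(1, M + 1):
--             for b in range(bugs + 1):
--                 s = dp[i % 2][j - 1][b - A[i - 1]] if b >= A[i - 1] else 0
--                 s += dp[(i + 1) % 2][j][b]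
--                 s %= MOD
--                 dp[i % 2][j][b] = s
--
--     return sum(dp[N % 2][M]) % MOD
-- ===== SOURCE B (Python) =====
-- def solve(N, A, M, bugs, MOD):
--     # Top-down, demand-driven evaluation of the recursion
--     #   f(i, j, b) = ways for the first i programmers to write exactly j lines
--     #                with exactly b bugs (reduced mod MOD),
--     # memoized in a dict and driven by an explicit work stack (no recursion limit).
--     memo = {}
--
--     def f(i0, j0, b0):
--         stack = [(i0, j0, b0)]
--         while stack:
--             key = stack[-1]
--             if key in memo:
--                 stack.pop()
--                 continue
--             i, j, b = key
--             if j == 0: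
--                 memo[key] = 1 if b == 0 else 0
--                 stack.pop()
--                 continue
--             if i == 0:
--                 memo[key] = 0
--                 stack.pop()
--                 continue
--             a = A[i - 1]
--             d1 = (i - 1, j, b)
--             d2 = (i, j - 1, b - a) if b >= a else None
--             need = [k for k in (d1, d2) if k is not None and k not in memo]
--             if need:
--                 stack.extend(need)
--                 continue
--             memo[key] = (memo[d1] + (memo[d2] if d2 is not None else 0)) % MOD
--             stack.pop()
--         return memo[(i0, j0, b0)]
--
--     return sum(f(N, M, b) for b in range(bugs + 1)) % MOD
-- ===== Notes on version B (the rewrite author's own statement) =====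
-- stated objective: alternative
-- what changed: B replaces A's bottom-up rolling pair of (M+1)x(bugs+1) matrices (with a special closed-form initialisation of the first programmer's row) by a top-down, demand-driven memoized recursion f(i,j,b) with a uniform base case, evaluated with a dict memo and an explicit work stack so only reachable states are computed.
-- outside the precondition, e.g. on solve(1, [-1], 1, 1, 10): A returns 1, B returns 0; on solve(-1, [1], 1, 0, 10): A returns 0, B raises IndexError
import Mathlib
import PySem

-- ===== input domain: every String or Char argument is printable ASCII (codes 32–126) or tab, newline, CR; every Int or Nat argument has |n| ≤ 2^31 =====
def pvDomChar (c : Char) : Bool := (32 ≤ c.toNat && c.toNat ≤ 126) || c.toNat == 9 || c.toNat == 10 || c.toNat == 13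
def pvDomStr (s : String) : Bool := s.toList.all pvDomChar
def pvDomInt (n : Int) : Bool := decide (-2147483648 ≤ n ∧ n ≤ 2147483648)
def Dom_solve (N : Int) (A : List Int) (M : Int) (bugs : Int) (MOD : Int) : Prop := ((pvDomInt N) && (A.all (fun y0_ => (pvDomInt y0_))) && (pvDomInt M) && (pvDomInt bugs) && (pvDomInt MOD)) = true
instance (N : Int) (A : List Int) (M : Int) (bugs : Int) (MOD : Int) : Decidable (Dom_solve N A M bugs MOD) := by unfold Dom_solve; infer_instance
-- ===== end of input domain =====

-- B replaces A's bottom-up rolling-matrix DP by a top-down memoized recursion f(i,j,b) with a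
-- uniform base case (objective: alternative; same asymptotic cost).
-- Pre_ restricts to the problem's natural domain (≥1 programmer whose per-line bug rates are all
-- listed and nonnegative, 0 ≤ M, 0 ≤ bugs, MOD ≠ 0); outside it A raises or returns accidental
-- values produced by Python's negative-index wraparound.

-- ===== PORT A =====
-- indexing helpers: total forms of Python's l[i] / l[i] = v; exact on Pre_ (all indices in range there)
def pvGet1 (l : List Int) (i : Int) : Int := PySem.List.pyGetD l i 0
def pvGet2 (t : List (List Int)) (i j : Int) : Int := pvGet1 (PySem.List.pyGetD t i []) j
def pvGetRow (t : List (List Int)) (i : Int) : List Int := PySem.List.pyGetD t i []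
def pvGetMat (d : List (List (List Int))) (i : Int) : List (List Int) := PySem.List.pyGetD d i []
def pvGet3 (d : List (List (List Int))) (i j b : Int) : Int := pvGet2 (pvGetMat d i) j b
def pvSet2 (t : List (List Int)) (i j : Int) (v : Int) : List (List Int) :=
  PySem.List.pySetD t i (PySem.List.pySetD (pvGetRow t i) j v)
def pvSet3 (d : List (List (List Int))) (i j b : Int) (v : Int) : List (List (List Int)) :=
  PySem.List.pySetD d i (pvSet2 (pvGetMat d i) j b v)

def solve (N : Int) (A : List Int) (M : Int) (bugs : Int) (MOD : Int) : Int :=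
  let zrow : List Int := (PySem.List.pyRange 0 (bugs + 1) 1).map (fun _ => 0)
  let zmat : List (List Int) := (PySem.List.pyRange 0 (M + 1) 1).map (fun _ => zrow)
  let dp : List (List (List Int)) := [zmat, zmat]
  -- Python A[0] raises IndexError on []; pyGetD's default is only reached outside Pre_
  let dp := (PySem.List.pyRange 1 (M + 1) 1).foldl (fun dp j =>
      if pvGet1 A 0 * j ≤ bugs then pvSet3 dp 1 j (pvGet1 A 0 * j) 1 else dp) dp
  let dp := pvSet3 dp 1 0 0 1
  let dp := pvSet3 dp 0 0 0 1
  let dp := (PySem.List.pyRange 2 (N + 1) 1).foldl (fun dp i =>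
    (PySem.List.pyRange 1 (M + 1) 1).foldl (fun dp j =>
      (PySem.List.pyRange 0 (bugs + 1) 1).foldl (fun dp b =>
        let s := if b ≥ pvGet1 A (i - 1) then
                   pvGet3 dp (PySem.Int.mod i 2) (j - 1) (b - pvGet1 A (i - 1)) else 0
        let s := s + pvGet3 dp (PySem.Int.mod (i + 1) 2) j b
        let s := PySem.Int.mod s MOD
        pvSet3 dp (PySem.Int.mod i 2) j b s) dp) dp) dp
  PySem.Int.mod (pvGetRow (pvGetMat dp (PySem.Int.mod N 2)) M).sum MOD

-- ===== PORT B =====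
-- Source B's f(i, j, b): the dict memo and the explicit work stack are a pure evaluation strategy of
-- this recursion (they change nothing about its value); the port transcribes f's branches in
-- order (j == 0 base, i == 0 base, then the guarded step reading A[i-1]).
def pvF (A : List Int) (MOD : Int) : ℕ → ℕ → Int → Int
  | _, 0, b => if b = 0 then 1 else 0
  | 0, _+1, _ => 0
  | i+1, j+1, b =>
      PySem.Int.mod (pvF A MOD i (j+1) b +
        (if b ≥ PySem.List.pyGetD A (i : Int) 0 then
            pvF A MOD (i+1) j (b - PySem.List.pyGetD A (i : Int) 0) else 0)) MOD
  termination_by i j _ => (i, j)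

def solve_alt (N : Int) (A : List Int) (M : Int) (bugs : Int) (MOD : Int) : Int :=
  -- Pre_ has 0 ≤ N and 0 ≤ M, so the .toNat conversions are exact there
  PySem.Int.mod (((PySem.List.pyRange 0 (bugs + 1) 1).map
      (fun b => pvF A MOD N.toNat M.toNat b)).sum) MOD

-- ===== PRECONDITION & SPEC =====
-- Pre_ = the problem's natural domain: nonnegative line count and bug limit, nonzero modulus,
-- and — whenever at least one line is to be written (M ≥ 1) — a nonnegative programmer count
-- whose per-line bug rates A[0..max(N,1)) are present and nonnegative (A reads A[0] even when
-- N = 0; with M = 0 neither program touches N or A, so nothing more is required).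
-- It excludes inputs where A raises (missing A[i], bugs<0, M<0, MOD=0, negative rates reaching
-- an out-of-range index) and inputs where A's accidental value comes from Python's
-- negative-index wraparound (negative rates, or negative N indexing dp from the end).
def Pre_solve (N : Int) (A : List Int) (M : Int) (bugs : Int) (MOD : Int) : Prop :=
  0 ≤ M ∧ 0 ≤ bugs ∧ MOD ≠ 0 ∧
  (1 ≤ M → (0 ≤ N ∧ 1 ≤ (A.length : Int) ∧ N ≤ (A.length : Int) ∧ ∀ x ∈ A.take (max N.toNat 1), 0 ≤ x))
instance (N : Int) (A : List Int) (M : Int) (bugs : Int) (MOD : Int) : Decidable (Pre_solve N A M bugs MOD) := by unfold Pre_solve; infer_instance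
def pvWitness_solve : Int × List Int × Int × Int × Int := (2, [1, 2], 3, 4, 1000000007)

def Spec_solve (N : Int) (A : List Int) (M : Int) (bugs : Int) (MOD : Int) (out : Int) : Prop := out = solve_alt N A M bugs MOD
instance (N : Int) (A : List Int) (M : Int) (bugs : Int) (MOD : Int) (out : Int) : Decidable (Spec_solve N A M bugs MOD out) := by unfold Spec_solve; infer_instance

-- ===== CLAIM (what is proved, stated in full; the proofs are below) =====
def Claim_equal_solve : Prop := ∀ (N : Int) (A : List Int) (M : Int) (bugs : Int) (MOD : Int), Dom_solve N A M bugs MOD → Pre_solve N A M bugs MOD → Spec_solve N A M bugs MOD (solve N A M bugs MOD)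

-- ===== LEMMAS AND PROOFS =====

-- proof-only helpers: abstract DP tables and loop invariants

-- per-programmer bug rate, ℕ-indexed (A[i] under Pre_)
def pvA (A : List Int) (i : ℕ) : Int := A.getD i 0

-- B's recursion with the index bridged: pvW = pvF with pyGetD replaced by getD
def pvW (A : List Int) (MOD : Int) : ℕ → ℕ → Int → Int
  | 0, 0, b => if b = 0 then 1 else 0
  | 0, _+1, _ => 0
  | _+1, 0, b => if b = 0 then 1 else 0
  | i+1, j+1, b =>
      PySem.Int.mod (pvW A MOD i (j+1) b +
        (if b ≥ pvA A i then pvW A MOD (i+1) j (b - pvA A i) else 0)) MOD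
  termination_by i j _ => (i, j)

-- A's recurrence: same shape, but the first programmer's row is the raw closed-form init
def pvV (A : List Int) (MOD : Int) : ℕ → ℕ → Int → Int
  | _, 0, b => if b = 0 then 1 else 0
  | 0, _+1, _ => 0
  | 1, j+1, b => if b = pvA A 0 * ((j : Int) + 1) then 1 else 0
  | i+2, j+1, b =>
      PySem.Int.mod ((if b ≥ pvA A (i+1) then pvV A MOD (i+2) j (b - pvA A (i+1)) else 0)
        + pvV A MOD (i+1) (j+1) b) MOD
  termination_by i j _ => (i, j)

lemma pvF_eq_pvW (A : List Int) (MOD : Int) :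
    ∀ (i j : ℕ) (b : Int), pvF A MOD i j b = pvW A MOD i j b := by
  intro i
  induction i with
  | zero =>
      intro j
      cases j with
      | zero => intro b; rw [pvF, pvW]
      | succ j => intro b; rw [pvF, pvW]
  | succ i ihi =>
      intro j
      induction j with
      | zero => intro b; rw [pvF, pvW]
      | succ j ihj =>
          intro b
          rw [pvF, pvW, PySem.List.pyGetD_natCast]
          rw [show A.getD i 0 = pvA A i from rfl, ihi (j+1) b]
          by_cases h : b ≥ pvA A i
          · rw [if_pos h, if_pos h, ihj (b - pvA A i)]
          · rw [if_neg h, if_neg h]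

lemma pvW_row0 (A : List Int) (MOD : Int) (i : ℕ) (b : Int) :
    pvW A MOD i 0 b = if b = 0 then 1 else 0 := by
  cases i <;> simp [pvW]

lemma pvW_zero (A : List Int) (MOD : Int) (j : ℕ) (b : Int) :
    pvW A MOD 0 (j+1) b = 0 := by simp [pvW]

lemma pvW_step (A : List Int) (MOD : Int) (i j : ℕ) (b : Int) :
    pvW A MOD (i+1) (j+1) b =
      PySem.Int.mod (pvW A MOD i (j+1) b +
        (if b ≥ pvA A i then pvW A MOD (i+1) j (b - pvA A i) else 0)) MOD := by
  rw [pvW]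

lemma pvV_row0 (A : List Int) (MOD : Int) (i : ℕ) (b : Int) :
    pvV A MOD i 0 b = if b = 0 then 1 else 0 := by
  match i with
  | 0 => rw [pvV]
  | 1 => rw [pvV]
  | i+2 => rw [pvV]

lemma pvV_one (A : List Int) (MOD : Int) (j : ℕ) (b : Int) :
    pvV A MOD 1 j b = if b = pvA A 0 * (j : Int) then 1 else 0 := by
  match j with
  | 0 => rw [pvV]; simp
  | j+1 => rw [pvV]; push_cast; ring_nf

lemma pvV_step (A : List Int) (MOD : Int) (i j : ℕ) (b : Int) :
    pvV A MOD (i+2) (j+1) b =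
      PySem.Int.mod ((if b ≥ pvA A (i+1) then pvV A MOD (i+2) j (b - pvA A (i+1)) else 0)
        + pvV A MOD (i+1) (j+1) b) MOD := by
  rw [pvV]

-- Python % is floored mod
lemma pvmod_eq (a m : Int) : PySem.Int.mod a m = Int.fmod a m := by simp [PySem.Int.mod]

lemma pvmod_mod (a m : Int) : PySem.Int.mod (PySem.Int.mod a m) m = PySem.Int.mod a m := by
  simp only [pvmod_eq]; exact Int.fmod_fmod_of_dvd a dvd_rfl

lemma pvmod_congr_add {m x x' y y' : Int}
    (hx : PySem.Int.mod x m = PySem.Int.mod x' m)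
    (hy : PySem.Int.mod y m = PySem.Int.mod y' m) :
    PySem.Int.mod (x + y) m = PySem.Int.mod (x' + y') m := by
  simp only [pvmod_eq] at *
  rw [← Int.fmod_add_fmod, ← Int.add_fmod_fmod, hx, hy, Int.fmod_add_fmod, Int.add_fmod_fmod]

lemma pvmod_sum_congr (m : Int) (l : List ℕ) (f h : ℕ → Int)
    (H : ∀ k ∈ l, PySem.Int.mod (f k) m = PySem.Int.mod (h k) m) :
    PySem.Int.mod ((l.map f).sum) m = PySem.Int.mod ((l.map h).sum) m := by
  induction l with
  | nil => rfl
  | cons x t ih =>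
      simp only [List.map_cons, List.sum_cons]
      exact pvmod_congr_add (H x (by simp)) (ih (fun k hk => H k (by simp [hk])))

-- generic loop invariant for a foldl over range(lo, stop)
lemma pvFoldInv {St : Type} (lo stop : Int) (P : Int → St) (body : St → Int → St)
    (H : ∀ i, lo ≤ i → i < stop → body (P i) i = P (i + 1)) :
    ∀ i, lo ≤ i → i ≤ stop → (PySem.List.pyRange i stop 1).foldl body (P i) = P stop := by
  intro i hlo hle
  induction hfuel : (stop - i).toNat generalizing i with
  | zero =>
      have : i = stop := by omega
      subst this
      rw [PySem.List.pyRange_one_eq_nil le_rfl]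
      rfl
  | succ fuel ih =>
      have hlt : i < stop := by omega
      rw [PySem.List.pyRange_one_cons hlt, List.foldl_cons, H i hlo hlt]
      exact ih (i + 1) (by omega) (by omega) (by omega)

-- set on a range-map rewrites pointwise
lemma pvSet_range_map {α : Type} (n k : ℕ) (f : ℕ → α) (v : α) :
    ((List.range n).map f).set k v = (List.range n).map (fun k' => if k' = k then v else f k') := by
  apply List.ext_getElem
  · simp
  · intro idx h1 h2
    simp only [List.getElem_set, List.getElem_map, List.getElem_range]
    simp only [List.length_set, List.length_map, List.length_range] at h1
    by_cases h : idx = k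
    · subst h; simp
    · simp [h, Ne.symm h]

-- rows as lists
def pvRowW (A : List Int) (MOD : Int) (g i j : ℕ) : List Int :=
  (List.range g).map (fun (k : ℕ) => pvW A MOD i j (k : Int))
def pvRowV (A : List Int) (MOD : Int) (g i j : ℕ) : List Int :=
  (List.range g).map (fun (k : ℕ) => pvV A MOD i j (k : Int))
def pvMatV (A : List Int) (MOD : Int) (g m1 i : ℕ) : List (List Int) :=
  (List.range m1).map (fun j => pvRowV A MOD g i j)

lemma pvTbl_get {α : Type} (n : ℕ) (F : ℕ → List α) (i : Int) (h0 : 0 ≤ i) (h : i < (n : Int)) :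
    PySem.List.pyGetD ((List.range n).map F) i [] = F i.toNat := by
  rw [PySem.List.pyGetD_eq_getElem _ _ h0 (by simpa using h)]
  simp

lemma pvRowV_get (A : List Int) (MOD : Int) (g i j : ℕ) (x : Int) (h0 : 0 ≤ x) (h : x < (g : Int)) :
    PySem.List.pyGetD (pvRowV A MOD g i j) x 0 = pvV A MOD i j x := by
  rw [pvRowV, PySem.List.pyGetD_eq_getElem _ _ h0 (by simpa using h)]
  rw [List.getElem_map, List.getElem_range, Int.toNat_of_nonneg h0]

-- A's cells and B's cells are congruent mod MOD (rows i ≥ 1)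
lemma pvVW (A : List Int) (MOD : Int) (h0 : 0 ≤ pvA A 0) :
    ∀ (i j : ℕ) (b : Int),
      PySem.Int.mod (pvV A MOD (i+1) j b) MOD = PySem.Int.mod (pvW A MOD (i+1) j b) MOD := by
  intro i
  induction i with
  | zero =>
      intro j
      induction j with
      | zero => intro b; rw [pvV_row0, pvW_row0]
      | succ j ihj =>
          intro b
          have ihj' : ∀ c, PySem.Int.mod (pvV A MOD 1 j c) MOD = PySem.Int.mod (pvW A MOD 1 j c) MOD := ihj
          have hcast : ((j + 1 : ℕ) : Int) = (j : Int) + 1 := by push_cast; ring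
          rw [pvW_step, pvmod_mod, pvW_zero, pvV_one, hcast, mul_add, mul_one]
          by_cases hba : b ≥ pvA A 0
          · rw [if_pos hba, zero_add, ← ihj' (b - pvA A 0), pvV_one]
            congr 1
            split_ifs with p q
            · rfl
            · exact absurd (show b - pvA A 0 = pvA A 0 * (j:Int) by linarith) q
            · exact absurd (show b = pvA A 0 * (j:Int) + pvA A 0 by linarith) p
            · rfl
          · have hj : (0:Int) ≤ pvA A 0 * (j : Int) := mul_nonneg h0 (by positivity)
            simp only [ge_iff_le, not_le] at hba
            rw [if_neg (show ¬ b ≥ pvA A 0 from by simp only [ge_iff_le, not_le]; exact hba),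
                if_neg (show ¬ b = pvA A 0 * (j:Int) + pvA A 0 from by intro h; linarith)]
            norm_num
  | succ i ihi =>
      intro j
      induction j with
      | zero => intro b; rw [pvV_row0, pvW_row0]
      | succ j ihj =>
          intro b
          have ihi' : ∀ j c, PySem.Int.mod (pvV A MOD (i+1) j c) MOD = PySem.Int.mod (pvW A MOD (i+1) j c) MOD := ihi
          have ihj' : ∀ c, PySem.Int.mod (pvV A MOD (i+2) j c) MOD = PySem.Int.mod (pvW A MOD (i+2) j c) MOD := ihj
          rw [pvV_step, pvW_step, pvmod_mod, pvmod_mod, add_comm]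
          refine pvmod_congr_add (ihi' (j+1) b) ?_
          by_cases hba : b ≥ pvA A (i+1)
          · rw [if_pos hba, if_pos hba]
            exact ihj' (b - pvA A (i+1))
          · rw [if_neg hba, if_neg hba]

-- ----- A side -----

-- the rolling pair of matrices: X sits at index c, Y at the other slot (c ∈ {0,1})
def pvDuoAt (c : Int) (X Y : List (List Int)) : List (List (List Int)) :=
  if c = 0 then [X, Y] else [Y, X]

lemma pvDuoAt_get_c (c : Int) (hc : c = 0 ∨ c = 1) (X Y : List (List Int)) :
    PySem.List.pyGetD (pvDuoAt c X Y) c [] = X := by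
  rcases hc with h | h <;> subst h <;> rw [pvDuoAt] <;> norm_num <;>
    rw [PySem.List.pyGetD_eq_getElem _ _ (by norm_num) (by norm_num)] <;> rfl

lemma pvDuoAt_get_p (c p : Int) (hcp : (c = 0 ∧ p = 1) ∨ (c = 1 ∧ p = 0)) (X Y : List (List Int)) :
    PySem.List.pyGetD (pvDuoAt c X Y) p [] = Y := by
  rcases hcp with ⟨h1, h2⟩ | ⟨h1, h2⟩ <;> subst h1 <;> subst h2 <;> rw [pvDuoAt] <;> norm_num <;>
    rw [PySem.List.pyGetD_eq_getElem _ _ (by norm_num) (by norm_num)] <;> rfl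

lemma pvDuoAt_set_c (c : Int) (hc : c = 0 ∨ c = 1) (X Y V : List (List Int)) :
    PySem.List.pySetD (pvDuoAt c X Y) c V = pvDuoAt c V Y := by
  rcases hc with h | h <;> subst h <;> rw [pvDuoAt, pvDuoAt] <;> norm_num <;>
    rw [PySem.List.pySetD_of_nonneg _ _ (by norm_num)] <;> rfl

-- the all-zero row and the mixed tables of A's loops
def pvZRow (g : ℕ) : List Int := (List.range g).map (fun _ => (0 : Int))
def pvInitMix (A : List Int) (MOD : Int) (g m1 jN : ℕ) : List (List Int) :=
  (List.range m1).map (fun j' => if 1 ≤ j' ∧ j' < jN then pvRowV A MOD g 1 j' else pvZRow g)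
def pvRowMix (A : List Int) (MOD : Int) (g iN jN bN : ℕ) : List Int :=
  (List.range g).map (fun (k : ℕ) => if k < bN then pvV A MOD iN jN (k : Int) else pvV A MOD (iN-2) jN (k : Int))
def pvJMix (A : List Int) (MOD : Int) (g m1 iN jN : ℕ) : List (List Int) :=
  (List.range m1).map (fun j' => if j' < jN then pvRowV A MOD g iN j' else pvRowV A MOD g (iN-2) j')
def pvJBMix (A : List Int) (MOD : Int) (g m1 iN jN bN : ℕ) : List (List Int) :=
  (List.range m1).map (fun j' => if j' = jN then pvRowMix A MOD g iN jN bN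
    else (if j' < jN then pvRowV A MOD g iN j' else pvRowV A MOD g (iN-2) j'))

-- A's inner loop: cell (j,b) of the current matrix is rewritten
lemma pvStepInnerA (A : List Int) (MOD N M bugs : Int) (c p : Int)
    (hcp : (c = 0 ∧ p = 1) ∨ (c = 1 ∧ p = 0))
    (iN : ℕ) (hi2 : 2 ≤ iN) (hiN : (iN : Int) ≤ N)
    (i : Int) (hieq : i = (iN : Int))
    (hNA : N ≤ (A.length : Int))
    (ha : ∀ k : ℕ, (k : Int) < N → 0 ≤ pvA A k)
    (j : Int) (hj1 : 1 ≤ j) (hjM : j < M + 1)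
    (b : Int) (hb0 : 0 ≤ b) (hbg : b < bugs + 1) :
    pvSet3 (pvDuoAt c (pvJBMix A MOD (bugs+1).toNat (M+1).toNat iN j.toNat b.toNat)
                     (pvMatV A MOD (bugs+1).toNat (M+1).toNat (iN-1))) c j b
      (PySem.Int.mod ((if b ≥ pvGet1 A (i - 1) then
          pvGet3 (pvDuoAt c (pvJBMix A MOD (bugs+1).toNat (M+1).toNat iN j.toNat b.toNat)
                     (pvMatV A MOD (bugs+1).toNat (M+1).toNat (iN-1))) c (j - 1) (b - pvGet1 A (i - 1)) else 0)
        + pvGet3 (pvDuoAt c (pvJBMix A MOD (bugs+1).toNat (M+1).toNat iN j.toNat b.toNat)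
                     (pvMatV A MOD (bugs+1).toNat (M+1).toNat (iN-1))) p j b) MOD)
    = pvDuoAt c (pvJBMix A MOD (bugs+1).toNat (M+1).toNat iN j.toNat (b.toNat + 1))
               (pvMatV A MOD (bugs+1).toNat (M+1).toNat (iN-1)) := by
  have hcc : c = 0 ∨ c = 1 := by rcases hcp with ⟨h, _⟩ | ⟨h, _⟩ <;> [left; right] <;> exact h
  have hlen : (i - 1).toNat < A.length := by omega
  have hA : PySem.List.pyGetD A (i - 1) 0 = pvA A ((i - 1).toNat) := by
    rw [PySem.List.pyGetD_eq_getElem A 0 (by omega) (by omega), pvA,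
        List.getD_eq_getElem A 0 hlen]
  have hia : (i - 1).toNat = iN - 1 := by omega
  have haN : 0 ≤ pvA A (iN - 1) := ha _ (by omega)
  have hjt1 : (j - 1).toNat = j.toNat - 1 := by omega
  have hbt : ((b.toNat : ℕ) : Int) = b := Int.toNat_of_nonneg hb0
  simp only [pvSet3, pvSet2, pvGet3, pvGet2, pvGet1, pvGetMat, pvGetRow]
  rw [pvDuoAt_get_c c hcc, pvDuoAt_get_p c p hcp]
  have hrow1 : PySem.List.pyGetD (pvJBMix A MOD (bugs+1).toNat (M+1).toNat iN j.toNat b.toNat) (j-1) []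
      = pvRowV A MOD (bugs+1).toNat iN (j.toNat - 1) := by
    rw [pvJBMix, pvTbl_get _ _ _ (by omega) (by omega), hjt1,
        if_neg (show ¬ j.toNat - 1 = j.toNat by omega), if_pos (show j.toNat - 1 < j.toNat by omega)]
  have hrow2 : PySem.List.pyGetD (pvMatV A MOD (bugs+1).toNat (M+1).toNat (iN-1)) j []
      = pvRowV A MOD (bugs+1).toNat (iN-1) j.toNat := by
    rw [pvMatV, pvTbl_get _ _ _ (by omega) (by omega)]
  have hrowj : PySem.List.pyGetD (pvJBMix A MOD (bugs+1).toNat (M+1).toNat iN j.toNat b.toNat) j []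
      = pvRowMix A MOD (bugs+1).toNat iN j.toNat b.toNat := by
    rw [pvJBMix, pvTbl_get _ _ _ (by omega) (by omega), if_pos rfl]
  rw [hA, hia, hrow1, hrow2, hrowj,
      pvRowV_get A MOD (bugs+1).toNat (iN-1) j.toNat b hb0 (by omega)]
  have hstep := pvV_step A MOD (iN - 2) (j.toNat - 1) b
  rw [show iN - 2 + 2 = iN from by omega, show iN - 2 + 1 = iN - 1 from by omega,
      show j.toNat - 1 + 1 = j.toNat from by omega] at hstep
  have hval : PySem.Int.mod ((if b ≥ pvA A (iN - 1) then
        PySem.List.pyGetD (pvRowV A MOD (bugs+1).toNat iN (j.toNat - 1)) (b - pvA A (iN - 1)) 0 else 0)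
      + pvV A MOD (iN-1) j.toNat b) MOD = pvV A MOD iN j.toNat b := by
    by_cases hba : b ≥ pvA A (iN - 1)
    · rw [if_pos hba, pvRowV_get A MOD (bugs+1).toNat iN (j.toNat - 1)
            (b - pvA A (iN - 1)) (by omega) (by omega), hstep, if_pos hba]
    · rw [if_neg hba, hstep, if_neg hba]
  rw [hval]
  have hsetrow : PySem.List.pySetD (pvRowMix A MOD (bugs+1).toNat iN j.toNat b.toNat) b
        (pvV A MOD iN j.toNat b)
      = pvRowMix A MOD (bugs+1).toNat iN j.toNat (b.toNat + 1) := by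
    rw [PySem.List.pySetD_of_nonneg _ _ hb0, pvRowMix, pvSet_range_map, pvRowMix]
    apply List.map_congr_left
    intro k _
    by_cases h : k = b.toNat
    · subst h; rw [if_pos rfl, if_pos (by omega), hbt]
    · rw [if_neg h]
      by_cases h2 : k < b.toNat
      · rw [if_pos h2, if_pos (by omega)]
      · rw [if_neg h2, if_neg (by omega)]
  have hsetJB : PySem.List.pySetD (pvJBMix A MOD (bugs+1).toNat (M+1).toNat iN j.toNat b.toNat) j
        (pvRowMix A MOD (bugs+1).toNat iN j.toNat (b.toNat + 1))
      = pvJBMix A MOD (bugs+1).toNat (M+1).toNat iN j.toNat (b.toNat + 1) := by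
    rw [PySem.List.pySetD_of_nonneg _ _ (show (0:Int) ≤ j by omega), pvJBMix, pvSet_range_map, pvJBMix]
    apply List.map_congr_left
    intro j' _
    by_cases h : j' = j.toNat
    · subst h
      rw [if_pos (show j.toNat = (j).toNat from rfl), if_pos rfl]
    · rw [if_neg (show ¬ j' = j.toNat from h), if_neg h, if_neg h]
  rw [hsetrow, hsetJB, pvDuoAt_set_c c hcc]

-- A's middle loop: one full sweep over b rebuilds row j
lemma pvStepMidA (A : List Int) (MOD N M bugs : Int) (c p : Int)
    (hcp : (c = 0 ∧ p = 1) ∨ (c = 1 ∧ p = 0))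
    (iN : ℕ) (hi2 : 2 ≤ iN) (hiN : (iN : Int) ≤ N)
    (i : Int) (hieq : i = (iN : Int))
    (hb : 0 ≤ bugs)
    (hNA : N ≤ (A.length : Int))
    (ha : ∀ k : ℕ, (k : Int) < N → 0 ≤ pvA A k)
    (j : Int) (hj1 : 1 ≤ j) (hjM : j < M + 1) :
    (PySem.List.pyRange 0 (bugs + 1) 1).foldl (fun dp b =>
        pvSet3 dp c j b
          (PySem.Int.mod ((if b ≥ pvGet1 A (i - 1) then
              pvGet3 dp c (j - 1) (b - pvGet1 A (i - 1)) else 0)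
            + pvGet3 dp p j b) MOD))
      (pvDuoAt c (pvJMix A MOD (bugs+1).toNat (M+1).toNat iN j.toNat)
                 (pvMatV A MOD (bugs+1).toNat (M+1).toNat (iN-1)))
    = pvDuoAt c (pvJMix A MOD (bugs+1).toNat (M+1).toNat iN (j.toNat + 1))
               (pvMatV A MOD (bugs+1).toNat (M+1).toNat (iN-1)) := by
  have hb1 : pvJMix A MOD (bugs+1).toNat (M+1).toNat iN j.toNat
      = pvJBMix A MOD (bugs+1).toNat (M+1).toNat iN j.toNat 0 := by
    rw [pvJMix, pvJBMix]
    apply List.map_congr_left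
    intro j' _
    by_cases h : j' = j.toNat
    · subst h
      rw [if_pos rfl, if_neg (show ¬ j.toNat < j.toNat by omega), pvRowMix, pvRowV]
      exact List.map_congr_left (fun k _ => by rw [if_neg (by omega)])
    · rw [if_neg h]
  have hb2 : pvJBMix A MOD (bugs+1).toNat (M+1).toNat iN j.toNat (bugs+1).toNat
      = pvJMix A MOD (bugs+1).toNat (M+1).toNat iN (j.toNat + 1) := by
    rw [pvJMix, pvJBMix]
    apply List.map_congr_left
    intro j' _
    by_cases h : j' = j.toNat
    · subst h
      rw [if_pos rfl, if_pos (show j.toNat < j.toNat + 1 by omega), pvRowMix, pvRowV]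
      exact List.map_congr_left (fun k hk => by
        rw [if_pos (List.mem_range.mp hk)])
    · rw [if_neg h]
      by_cases h2 : j' < j.toNat
      · rw [if_pos h2, if_pos (by omega)]
      · rw [if_neg h2, if_neg (by omega)]
  have H : ∀ b : Int, 0 ≤ b → b < bugs + 1 →
      (fun dp b => pvSet3 dp c j b
          (PySem.Int.mod ((if b ≥ pvGet1 A (i - 1) then
              pvGet3 dp c (j - 1) (b - pvGet1 A (i - 1)) else 0)
            + pvGet3 dp p j b) MOD))
        ((fun x : Int => pvDuoAt c (pvJBMix A MOD (bugs+1).toNat (M+1).toNat iN j.toNat x.toNat)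
            (pvMatV A MOD (bugs+1).toNat (M+1).toNat (iN-1))) b) b
      = (fun x : Int => pvDuoAt c (pvJBMix A MOD (bugs+1).toNat (M+1).toNat iN j.toNat x.toNat)
            (pvMatV A MOD (bugs+1).toNat (M+1).toNat (iN-1))) (b + 1) := by
    intro b h0 h1
    simp only []
    rw [show (b + 1).toNat = b.toNat + 1 from by omega]
    exact pvStepInnerA A MOD N M bugs c p hcp iN hi2 hiN i hieq hNA ha j hj1 hjM b h0 h1
  have hfold := pvFoldInv 0 (bugs + 1)
      (fun x : Int => pvDuoAt c (pvJBMix A MOD (bugs+1).toNat (M+1).toNat iN j.toNat x.toNat)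
          (pvMatV A MOD (bugs+1).toNat (M+1).toNat (iN-1)))
      (fun dp b => pvSet3 dp c j b
          (PySem.Int.mod ((if b ≥ pvGet1 A (i - 1) then
              pvGet3 dp c (j - 1) (b - pvGet1 A (i - 1)) else 0)
            + pvGet3 dp p j b) MOD))
      H 0 le_rfl (by omega)
  simp only [] at hfold
  rw [show ((0 : Int).toNat) = 0 from rfl] at hfold
  rw [hb1, hfold, hb2]

-- A's outer step: programmer i overwrites the stale matrix
lemma pvStepMainA (A : List Int) (MOD N M bugs : Int) (c p : Int)
    (hcp : (c = 0 ∧ p = 1) ∨ (c = 1 ∧ p = 0))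
    (iN : ℕ) (hi2 : 2 ≤ iN) (hiN : (iN : Int) ≤ N)
    (i : Int) (hieq : i = (iN : Int))
    (hb : 0 ≤ bugs) (hM : 0 ≤ M)
    (hNA : N ≤ (A.length : Int))
    (ha : ∀ k : ℕ, (k : Int) < N → 0 ≤ pvA A k) :
    (PySem.List.pyRange 1 (M + 1) 1).foldl (fun dp j =>
      (PySem.List.pyRange 0 (bugs + 1) 1).foldl (fun dp b =>
        pvSet3 dp c j b
          (PySem.Int.mod ((if b ≥ pvGet1 A (i - 1) then
              pvGet3 dp c (j - 1) (b - pvGet1 A (i - 1)) else 0)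
            + pvGet3 dp p j b) MOD)) dp)
      (pvDuoAt c (pvMatV A MOD (bugs+1).toNat (M+1).toNat (iN-2))
                 (pvMatV A MOD (bugs+1).toNat (M+1).toNat (iN-1)))
    = pvDuoAt c (pvMatV A MOD (bugs+1).toNat (M+1).toNat iN)
               (pvMatV A MOD (bugs+1).toNat (M+1).toNat (iN-1)) := by
  have hstart : pvMatV A MOD (bugs+1).toNat (M+1).toNat (iN-2)
      = pvJMix A MOD (bugs+1).toNat (M+1).toNat iN 1 := by
    rw [pvMatV, pvJMix]
    apply List.map_congr_left
    intro j' _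
    by_cases h : j' = 0
    · subst h
      rw [if_pos (by omega), pvRowV, pvRowV]
      exact List.map_congr_left (fun k _ => by rw [pvV_row0, pvV_row0])
    · rw [if_neg (by omega)]
  have hend : pvJMix A MOD (bugs+1).toNat (M+1).toNat iN ((M+1).toNat)
      = pvMatV A MOD (bugs+1).toNat (M+1).toNat iN := by
    rw [pvMatV, pvJMix]
    apply List.map_congr_left
    intro j' hj'
    rw [if_pos (List.mem_range.mp hj')]
  have H : ∀ j : Int, 1 ≤ j → j < M + 1 →
      (fun dp j => (PySem.List.pyRange 0 (bugs + 1) 1).foldl (fun dp b =>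
          pvSet3 dp c j b
            (PySem.Int.mod ((if b ≥ pvGet1 A (i - 1) then
                pvGet3 dp c (j - 1) (b - pvGet1 A (i - 1)) else 0)
              + pvGet3 dp p j b) MOD)) dp)
        ((fun x : Int => pvDuoAt c (pvJMix A MOD (bugs+1).toNat (M+1).toNat iN x.toNat)
            (pvMatV A MOD (bugs+1).toNat (M+1).toNat (iN-1))) j) j
      = (fun x : Int => pvDuoAt c (pvJMix A MOD (bugs+1).toNat (M+1).toNat iN x.toNat)
            (pvMatV A MOD (bugs+1).toNat (M+1).toNat (iN-1))) (j + 1) := by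
    intro j h1 h2
    simp only []
    rw [show (j + 1).toNat = j.toNat + 1 from by omega]
    exact pvStepMidA A MOD N M bugs c p hcp iN hi2 hiN i hieq hb hNA ha j h1 h2
  have hfold := pvFoldInv 1 (M + 1)
      (fun x : Int => pvDuoAt c (pvJMix A MOD (bugs+1).toNat (M+1).toNat iN x.toNat)
          (pvMatV A MOD (bugs+1).toNat (M+1).toNat (iN-1)))
      (fun dp j => (PySem.List.pyRange 0 (bugs + 1) 1).foldl (fun dp b =>
          pvSet3 dp c j b
            (PySem.Int.mod ((if b ≥ pvGet1 A (i - 1) then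
                pvGet3 dp c (j - 1) (b - pvGet1 A (i - 1)) else 0)
              + pvGet3 dp p j b) MOD)) dp)
      H 1 le_rfl (by omega)
  simp only [] at hfold
  rw [show ((1 : Int).toNat) = 1 from rfl] at hfold
  rw [hstart, hfold, show ((M + 1).toNat : ℕ) = (M+1).toNat from rfl, hend]

-- literal two-element lists
lemma pvPair_get0 {α : Type} (X Y : List α) : PySem.List.pyGetD [X, Y] (0 : Int) [] = X := by
  rw [PySem.List.pyGetD_eq_getElem _ _ (by norm_num) (by norm_num)]; rfl
lemma pvPair_get1 {α : Type} (X Y : List α) : PySem.List.pyGetD [X, Y] (1 : Int) [] = Y := by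
  rw [PySem.List.pyGetD_eq_getElem _ _ (by norm_num) (by norm_num)]; rfl
lemma pvPair_set0 {α : Type} (X Y V : List α) : PySem.List.pySetD [X, Y] (0 : Int) V = [V, Y] := by
  rw [PySem.List.pySetD_of_nonneg _ _ (by norm_num)]; rfl
lemma pvPair_set1 {α : Type} (X Y V : List α) : PySem.List.pySetD [X, Y] (1 : Int) V = [X, V] := by
  rw [PySem.List.pySetD_of_nonneg _ _ (by norm_num)]; rfl

lemma pvV_zero (A : List Int) (MOD : Int) (j : ℕ) (b : Int) : pvV A MOD 0 (j+1) b = 0 := by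
  rw [pvV]

-- the rolling state after programmer iN: the fresh matrix sits at index iN % 2
def pvPairV (A : List Int) (MOD : Int) (g m1 iN : ℕ) : List (List (List Int)) :=
  if iN % 2 = 1 then [pvMatV A MOD g m1 (iN-1), pvMatV A MOD g m1 iN]
  else [pvMatV A MOD g m1 iN, pvMatV A MOD g m1 (iN-1)]

-- A's port computes row M of the V table
lemma solve_eq (N : Int) (A : List Int) (M : Int) (bugs : Int) (MOD : Int)
    (hN : 0 ≤ N) (hlen1 : 1 ≤ (A.length : Int)) (hNA : N ≤ (A.length : Int))
    (hM : 0 ≤ M) (hb : 0 ≤ bugs) (ha0' : 0 ≤ pvA A 0)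
    (ha : ∀ k : ℕ, (k : Int) < N → 0 ≤ pvA A k) :
    solve N A M bugs MOD =
      PySem.Int.mod ((pvRowV A MOD (bugs + 1).toNat N.toNat M.toNat).sum) MOD := by
  have ha0 : pvGet1 A 0 = pvA A 0 := by
    rw [pvGet1, PySem.List.pyGetD_eq_getElem A 0 le_rfl (by omega), pvA,
        List.getD_eq_getElem A 0 (by omega)]
    simp
  simp only [solve]
  rw [ha0]
  have hzrow : (PySem.List.pyRange 0 (bugs + 1) 1).map (fun _ => (0 : Int))
      = pvZRow (bugs + 1).toNat := by
    rw [PySem.List.pyRange_zero (bugs + 1), List.map_map, pvZRow]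
    exact List.map_congr_left (fun _ _ => rfl)
  rw [hzrow]
  have hzmat : (PySem.List.pyRange 0 (M + 1) 1).map (fun _ => pvZRow (bugs + 1).toNat)
      = (List.range (M + 1).toNat).map (fun _ => pvZRow (bugs + 1).toNat) := by
    rw [PySem.List.pyRange_zero (M + 1), List.map_map]
    exact List.map_congr_left (fun _ _ => rfl)
  rw [hzmat]
  -- the init loop fills matrix 1 with the first programmer's closed-form rows
  have hinit0 : (List.range (M + 1).toNat).map (fun _ => pvZRow (bugs + 1).toNat)
      = pvInitMix A MOD (bugs + 1).toNat (M + 1).toNat 1 := by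
    rw [pvInitMix]
    exact List.map_congr_left (fun j' _ => by rw [if_neg (by omega)])
  have H0 : ∀ j : Int, 1 ≤ j → j < M + 1 →
      (fun dp j => if pvA A 0 * j ≤ bugs then pvSet3 dp 1 j (pvA A 0 * j) 1 else dp)
        ((fun x : Int => [pvInitMix A MOD (bugs + 1).toNat (M + 1).toNat 1,
            pvInitMix A MOD (bugs + 1).toNat (M + 1).toNat x.toNat]) j) j
      = (fun x : Int => [pvInitMix A MOD (bugs + 1).toNat (M + 1).toNat 1,
            pvInitMix A MOD (bugs + 1).toNat (M + 1).toNat x.toNat]) (j + 1) := by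
    intro j h1 h2
    simp only []
    rw [show (j + 1).toNat = j.toNat + 1 from by omega]
    have hjt : ((j.toNat : ℕ) : Int) = j := by omega
    by_cases hcnd : pvA A 0 * j ≤ bugs
    · rw [if_pos hcnd]
      have h0j : 0 ≤ pvA A 0 * j := mul_nonneg ha0' (by omega)
      simp only [pvSet3, pvSet2, pvGetMat, pvGetRow]
      rw [pvPair_get1]
      have hrow0 : PySem.List.pyGetD (pvInitMix A MOD (bugs + 1).toNat (M + 1).toNat j.toNat) j []
          = pvZRow (bugs + 1).toNat := by
        rw [pvInitMix, pvTbl_get _ _ _ (by omega) (by omega), if_neg (by omega)]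
      rw [hrow0]
      have hsetcell : PySem.List.pySetD (pvZRow (bugs + 1).toNat) (pvA A 0 * j) (1 : Int)
          = pvRowV A MOD (bugs + 1).toNat 1 j.toNat := by
        rw [PySem.List.pySetD_of_nonneg _ _ h0j, pvZRow, pvSet_range_map, pvRowV]
        apply List.map_congr_left
        intro k _
        rw [pvV_one, hjt]
        set B := pvA A 0 * j with hB
        by_cases hk : (k : Int) = B
        · rw [if_pos (by omega), if_pos hk]
        · rw [if_neg (by omega), if_neg hk]
      rw [hsetcell]
      have hsetrow : PySem.List.pySetD (pvInitMix A MOD (bugs + 1).toNat (M + 1).toNat j.toNat) j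
            (pvRowV A MOD (bugs + 1).toNat 1 j.toNat)
          = pvInitMix A MOD (bugs + 1).toNat (M + 1).toNat (j.toNat + 1) := by
        rw [PySem.List.pySetD_of_nonneg _ _ (by omega), pvInitMix, pvSet_range_map, pvInitMix]
        apply List.map_congr_left
        intro j' _
        by_cases h : j' = j.toNat
        · subst h
          rw [if_pos rfl, if_pos (by omega)]
        · rw [if_neg h]
          by_cases h2 : 1 ≤ j' ∧ j' < j.toNat
          · rw [if_pos h2, if_pos (by omega)]
          · rw [if_neg h2, if_neg (by omega)]
      rw [hsetrow, pvPair_set1]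
    · rw [if_neg hcnd]
      have : pvInitMix A MOD (bugs + 1).toNat (M + 1).toNat j.toNat
          = pvInitMix A MOD (bugs + 1).toNat (M + 1).toNat (j.toNat + 1) := by
        rw [pvInitMix, pvInitMix]
        apply List.map_congr_left
        intro j' _
        by_cases h : j' = j.toNat
        · subst h
          rw [if_neg (by omega), if_pos (by omega), pvRowV]
          apply List.map_congr_left
          intro k hk
          rw [pvV_one, hjt, if_neg (by
            intro hkB
            have hkg : (k : Int) < ((bugs + 1).toNat : Int) := by
              exact_mod_cast List.mem_range.mp hk
            omega)]
        · by_cases h2 : 1 ≤ j' ∧ j' < j.toNat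
          · rw [if_pos h2, if_pos (by omega)]
          · rw [if_neg h2, if_neg (by omega)]
      rw [this]
  have hfold0 := pvFoldInv 1 (M + 1)
      (fun x : Int => [pvInitMix A MOD (bugs + 1).toNat (M + 1).toNat 1,
          pvInitMix A MOD (bugs + 1).toNat (M + 1).toNat x.toNat])
      (fun dp j => if pvA A 0 * j ≤ bugs then pvSet3 dp 1 j (pvA A 0 * j) 1 else dp)
      H0 1 le_rfl (by omega)
  simp only [] at hfold0
  rw [show ((1 : Int).toNat) = 1 from rfl] at hfold0
  rw [hinit0, hfold0]
  -- dp[1][0][0] = 1 completes matrix 1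
  have hdpB : pvSet3 [pvInitMix A MOD (bugs + 1).toNat (M + 1).toNat 1,
        pvInitMix A MOD (bugs + 1).toNat (M + 1).toNat (M + 1).toNat] 1 0 0 1
      = [pvInitMix A MOD (bugs + 1).toNat (M + 1).toNat 1,
         pvMatV A MOD (bugs + 1).toNat (M + 1).toNat 1] := by
    simp only [pvSet3, pvSet2, pvGetMat, pvGetRow]
    rw [pvPair_get1]
    have hrow0 : PySem.List.pyGetD (pvInitMix A MOD (bugs + 1).toNat (M + 1).toNat (M + 1).toNat) 0 []
        = pvZRow (bugs + 1).toNat := by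
      rw [pvInitMix, pvTbl_get _ _ _ le_rfl (by omega)]
      rw [if_neg (by omega)]
    rw [hrow0]
    have hsetcell : PySem.List.pySetD (pvZRow (bugs + 1).toNat) (0 : Int) (1 : Int)
        = pvRowV A MOD (bugs + 1).toNat 1 0 := by
      rw [PySem.List.pySetD_of_nonneg _ _ le_rfl, pvZRow, pvSet_range_map, pvRowV]
      apply List.map_congr_left
      intro k _
      rw [pvV_row0]
      by_cases hk : k = 0
      · subst hk; norm_num
      · rw [if_neg (by omega), if_neg (by exact_mod_cast hk)]
    rw [hsetcell]
    have hsetrow : PySem.List.pySetD (pvInitMix A MOD (bugs + 1).toNat (M + 1).toNat (M + 1).toNat) 0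
          (pvRowV A MOD (bugs + 1).toNat 1 0)
        = pvMatV A MOD (bugs + 1).toNat (M + 1).toNat 1 := by
      rw [PySem.List.pySetD_of_nonneg _ _ le_rfl, pvInitMix, pvSet_range_map, pvMatV]
      apply List.map_congr_left
      intro j' hj'
      by_cases h : j' = 0
      · subst h; simp
      · rw [if_neg (by omega),
            if_pos (by exact ⟨by omega, List.mem_range.mp hj'⟩)]
    rw [hsetrow, pvPair_set1]
  rw [hdpB]
  -- dp[0][0][0] = 1 completes matrix 0
  have hdpC : pvSet3 [pvInitMix A MOD (bugs + 1).toNat (M + 1).toNat 1,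
        pvMatV A MOD (bugs + 1).toNat (M + 1).toNat 1] 0 0 0 1
      = [pvMatV A MOD (bugs + 1).toNat (M + 1).toNat 0,
         pvMatV A MOD (bugs + 1).toNat (M + 1).toNat 1] := by
    simp only [pvSet3, pvSet2, pvGetMat, pvGetRow]
    rw [pvPair_get0]
    have hrow0 : PySem.List.pyGetD (pvInitMix A MOD (bugs + 1).toNat (M + 1).toNat 1) 0 []
        = pvZRow (bugs + 1).toNat := by
      rw [pvInitMix, pvTbl_get _ _ _ le_rfl (by omega), if_neg (by omega)]
    rw [hrow0]
    have hsetcell : PySem.List.pySetD (pvZRow (bugs + 1).toNat) (0 : Int) (1 : Int)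
        = pvRowV A MOD (bugs + 1).toNat 0 0 := by
      rw [PySem.List.pySetD_of_nonneg _ _ le_rfl, pvZRow, pvSet_range_map, pvRowV]
      apply List.map_congr_left
      intro k _
      rw [pvV_row0]
      by_cases hk : k = 0
      · subst hk; norm_num
      · rw [if_neg (by omega), if_neg (by exact_mod_cast hk)]
    rw [hsetcell]
    have hsetrow : PySem.List.pySetD (pvInitMix A MOD (bugs + 1).toNat (M + 1).toNat 1) 0
          (pvRowV A MOD (bugs + 1).toNat 0 0)
        = pvMatV A MOD (bugs + 1).toNat (M + 1).toNat 0 := by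
      rw [PySem.List.pySetD_of_nonneg _ _ le_rfl, pvInitMix, pvSet_range_map, pvMatV]
      apply List.map_congr_left
      intro j' _
      by_cases h : j' = 0
      · subst h; simp
      · rw [if_neg (by omega), if_neg (by omega), pvRowV]
        obtain ⟨m, rfl⟩ : ∃ m, j' = m + 1 := ⟨j' - 1, by omega⟩
        rw [pvZRow]
        exact List.map_congr_left (fun k _ => by rw [pvV_zero])
    rw [hsetrow, pvPair_set0]
  rw [hdpC]
  by_cases hN0 : N = 0
  · subst hN0
    rw [show ((0:Int) + 1) = 1 from rfl, PySem.List.pyRange_one_eq_nil (by norm_num : (1:Int) ≤ 2),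
        List.foldl_nil]
    simp only [pvGetMat, pvGetRow]
    rw [show PySem.Int.mod 0 2 = 0 from by decide, pvPair_get0, pvMatV,
        pvTbl_get _ _ _ (by omega) (by omega)]
    norm_num
  -- main loop
  have hN1 : 1 ≤ N := by omega
  have hP1 : ([pvMatV A MOD (bugs + 1).toNat (M + 1).toNat 0,
        pvMatV A MOD (bugs + 1).toNat (M + 1).toNat 1] : List (List (List Int)))
      = pvPairV A MOD (bugs + 1).toNat (M + 1).toNat ((2 : Int) - 1).toNat := by
    rw [show ((2 : Int) - 1).toNat = 1 from rfl, pvPairV, if_pos (by omega)]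
  have H1 : ∀ i : Int, 2 ≤ i → i < N + 1 →
      (fun dp i => (PySem.List.pyRange 1 (M + 1) 1).foldl (fun dp j =>
        (PySem.List.pyRange 0 (bugs + 1) 1).foldl (fun dp b =>
          pvSet3 dp (PySem.Int.mod i 2) j b
            (PySem.Int.mod ((if b ≥ pvGet1 A (i - 1) then
                pvGet3 dp (PySem.Int.mod i 2) (j - 1) (b - pvGet1 A (i - 1)) else 0)
              + pvGet3 dp (PySem.Int.mod (i + 1) 2) j b) MOD)) dp) dp)
        ((fun x : Int => pvPairV A MOD (bugs + 1).toNat (M + 1).toNat (x - 1).toNat) i) i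
      = (fun x : Int => pvPairV A MOD (bugs + 1).toNat (M + 1).toNat (x - 1).toNat) (i + 1) := by
    intro i h2i hiN1
    simp only []
    rw [show (i + 1 - 1 : Int) = i from by ring]
    have h2pos : (0 : Int) < 2 := by norm_num
    have hieq : i = ((i.toNat : ℕ) : Int) := by omega
    by_cases hpar : i.toNat % 2 = 0
    · have hc : PySem.Int.mod i 2 = 0 := by
        rw [PySem.Int.mod_eq_emod_of_pos h2pos]; omega
      have hp : PySem.Int.mod (i + 1) 2 = 1 := by
        rw [PySem.Int.mod_eq_emod_of_pos h2pos]; omega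
      simp only [hc, hp]
      have hst : pvPairV A MOD (bugs + 1).toNat (M + 1).toNat (i - 1).toNat
          = pvDuoAt 0 (pvMatV A MOD (bugs + 1).toNat (M + 1).toNat (i.toNat - 2))
                      (pvMatV A MOD (bugs + 1).toNat (M + 1).toNat (i.toNat - 1)) := by
        rw [show (i - 1).toNat = i.toNat - 1 from by omega, pvPairV,
            if_pos (by omega), pvDuoAt, if_pos rfl,
            show i.toNat - 1 - 1 = i.toNat - 2 from by omega]
      have hen : pvPairV A MOD (bugs + 1).toNat (M + 1).toNat i.toNat
          = pvDuoAt 0 (pvMatV A MOD (bugs + 1).toNat (M + 1).toNat i.toNat)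
                      (pvMatV A MOD (bugs + 1).toNat (M + 1).toNat (i.toNat - 1)) := by
        rw [pvPairV, if_neg (by omega), pvDuoAt, if_pos rfl]
      rw [hst, hen]
      exact pvStepMainA A MOD N M bugs 0 1 (Or.inl ⟨rfl, rfl⟩) i.toNat (by omega) (by omega)
        i (by omega) hb hM hNA ha
    · have hc : PySem.Int.mod i 2 = 1 := by
        rw [PySem.Int.mod_eq_emod_of_pos h2pos]; omega
      have hp : PySem.Int.mod (i + 1) 2 = 0 := by
        rw [PySem.Int.mod_eq_emod_of_pos h2pos]; omega
      simp only [hc, hp]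
      have hst : pvPairV A MOD (bugs + 1).toNat (M + 1).toNat (i - 1).toNat
          = pvDuoAt 1 (pvMatV A MOD (bugs + 1).toNat (M + 1).toNat (i.toNat - 2))
                      (pvMatV A MOD (bugs + 1).toNat (M + 1).toNat (i.toNat - 1)) := by
        rw [show (i - 1).toNat = i.toNat - 1 from by omega, pvPairV,
            if_neg (by omega), pvDuoAt, if_neg (by norm_num),
            show i.toNat - 1 - 1 = i.toNat - 2 from by omega]
      have hen : pvPairV A MOD (bugs + 1).toNat (M + 1).toNat i.toNat
          = pvDuoAt 1 (pvMatV A MOD (bugs + 1).toNat (M + 1).toNat i.toNat)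
                      (pvMatV A MOD (bugs + 1).toNat (M + 1).toNat (i.toNat - 1)) := by
        rw [pvPairV, if_pos (by omega), pvDuoAt, if_neg (by norm_num)]
      rw [hst, hen]
      exact pvStepMainA A MOD N M bugs 1 0 (Or.inr ⟨rfl, rfl⟩) i.toNat (by omega) (by omega)
        i (by omega) hb hM hNA ha
  have hfold1 := pvFoldInv 2 (N + 1)
      (fun x : Int => pvPairV A MOD (bugs + 1).toNat (M + 1).toNat (x - 1).toNat)
      (fun dp i => (PySem.List.pyRange 1 (M + 1) 1).foldl (fun dp j =>
        (PySem.List.pyRange 0 (bugs + 1) 1).foldl (fun dp b =>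
          pvSet3 dp (PySem.Int.mod i 2) j b
            (PySem.Int.mod ((if b ≥ pvGet1 A (i - 1) then
                pvGet3 dp (PySem.Int.mod i 2) (j - 1) (b - pvGet1 A (i - 1)) else 0)
              + pvGet3 dp (PySem.Int.mod (i + 1) 2) j b) MOD)) dp) dp)
      H1 2 le_rfl (by omega)
  simp only [] at hfold1
  rw [hP1, hfold1]
  -- read off the answer
  rw [show (N + 1 - 1 : Int) = N from by ring]
  simp only [pvGetMat, pvGetRow]
  have h2pos : (0 : Int) < 2 := by norm_num
  have hmat : PySem.List.pyGetD (pvPairV A MOD (bugs + 1).toNat (M + 1).toNat N.toNat)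
        (PySem.Int.mod N 2) []
      = pvMatV A MOD (bugs + 1).toNat (M + 1).toNat N.toNat := by
    by_cases hpar : N.toNat % 2 = 0
    · rw [show PySem.Int.mod N 2 = 0 from by rw [PySem.Int.mod_eq_emod_of_pos h2pos]; omega,
          pvPairV, if_neg (by omega), pvPair_get0]
    · rw [show PySem.Int.mod N 2 = 1 from by rw [PySem.Int.mod_eq_emod_of_pos h2pos]; omega,
          pvPairV, if_pos (by omega), pvPair_get1]
  rw [hmat, pvMatV, pvTbl_get _ _ _ (by omega) (by omega)]

lemma pvSing_get {α : Type} (X : List α) : PySem.List.pyGetD [X] (0 : Int) [] = X := by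
  rw [PySem.List.pyGetD_eq_getElem _ _ (by norm_num) (by norm_num)]; rfl
lemma pvSing_set {α : Type} (X V : List α) : PySem.List.pySetD [X] (0 : Int) V = [V] := by
  rw [PySem.List.pySetD_of_nonneg _ _ (by norm_num)]; rfl

-- rows 0 of the two tables agree outright
lemma pvVW0 (A : List Int) (MOD : Int) (j : ℕ) (b : Int) :
    pvV A MOD 0 j b = pvW A MOD 0 j b := by
  cases j with
  | zero => rw [pvV_row0, pvW_row0]
  | succ j => rw [pvV_zero, pvW_zero]

-- B's port computes row N.toNat of the W table
lemma solve_alt_eq (N : Int) (A : List Int) (M : Int) (bugs : Int) (MOD : Int) :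
    solve_alt N A M bugs MOD =
      PySem.Int.mod ((pvRowW A MOD (bugs + 1).toNat N.toNat M.toNat).sum) MOD := by
  simp only [solve_alt, pvRowW]
  congr 1
  rw [PySem.List.pyRange_zero (bugs + 1), List.map_map]
  congr 1
  exact List.map_congr_left (fun k _ => pvF_eq_pvW A MOD N.toNat M.toNat (k : Int))

-- with zero lines both programs return 1 % MOD without touching A
lemma solve_M0 (N : Int) (A : List Int) (bugs : Int) (MOD : Int) :
    solve N A 0 bugs MOD = solve_alt N A 0 bugs MOD := by
  rw [solve_alt_eq]
  simp only [solve]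
  rw [show ((0:Int) + 1) = 1 from rfl]
  rw [PySem.List.pyRange_one_eq_nil (le_rfl : (1:Int) ≤ 1)]
  simp only [List.foldl_nil]
  rw [PySem.List.foldl_ignore]
  rw [show PySem.List.pyRange 0 1 1 = [(0:Int)] from by decide]
  simp only [List.map_cons, List.map_nil]
  simp only [pvSet3, pvSet2, pvGetMat, pvGetRow]
  rw [pvPair_get1, pvSing_get, pvPair_set1, pvPair_get0, pvSing_get, pvPair_set0]
  have hzrow : (PySem.List.pyRange 0 (bugs + 1) 1).map (fun _ => (0 : Int))
      = pvZRow (bugs + 1).toNat := by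
    rw [PySem.List.pyRange_zero (bugs + 1), List.map_map, pvZRow]
    exact List.map_congr_left (fun _ _ => rfl)
  rw [hzrow]
  have hrow : PySem.List.pySetD (pvZRow (bugs + 1).toNat) (0:Int) (1:Int)
      = pvRowW A MOD (bugs + 1).toNat N.toNat 0 := by
    rw [PySem.List.pySetD_of_nonneg _ _ le_rfl, pvZRow, pvSet_range_map, pvRowW]
    apply List.map_congr_left
    intro k _
    rw [pvW_row0]
    by_cases hk : k = 0
    · subst hk; norm_num
    · rw [if_neg (by omega), if_neg (by exact_mod_cast hk)]
  rw [hrow]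
  have hm2 : PySem.Int.mod N 2 = 0 ∨ PySem.Int.mod N 2 = 1 := by
    rw [PySem.Int.mod_eq_emod_of_pos (by norm_num)]; omega
  rcases hm2 with h | h
  · rw [h, pvPair_get0, pvSing_set, pvSing_get]; rfl
  · rw [h, pvPair_get1, pvSing_set, pvSing_get]; rfl

-- ===== VERDICT (by name: the statement is the Claim_ definition above) =====
theorem solve_spec : Claim_equal_solve := by
  intro N A M bugs MOD _ hpre
  obtain ⟨hM, hb, _, himp⟩ := hpre
  by_cases hM1 : 1 ≤ M
  · obtain ⟨hN, hlen1, hNA, haTake⟩ := himp hM1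
    have hmem : ∀ k : ℕ, k < max N.toNat 1 → k < A.length → 0 ≤ pvA A k := by
      intro k hk hkl
      have h1 : k < (A.take (max N.toNat 1)).length := by
        rw [List.length_take]; omega
      have hmem : A[k] ∈ A.take (max N.toNat 1) := by
        have := List.getElem_mem h1
        rwa [List.getElem_take] at this
      have := haTake _ hmem
      rwa [pvA, List.getD_eq_getElem A 0 hkl]
    have ha : ∀ k : ℕ, (k : Int) < N → 0 ≤ pvA A k :=
      fun k hk => hmem k (by omega) (by omega)
    have ha0' : 0 ≤ pvA A 0 := hmem 0 (by omega) (by omega)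
    show solve N A M bugs MOD = solve_alt N A M bugs MOD
    rw [solve_eq N A M bugs MOD hN hlen1 hNA hM hb ha0' ha,
        solve_alt_eq, pvRowV, pvRowW]
    by_cases hN0 : N = 0
    · rw [show N.toNat = 0 from by omega]
      exact pvmod_sum_congr MOD (List.range (bugs + 1).toNat) _ _
        (fun k _ => by rw [pvVW0])
    · obtain ⟨m, hm⟩ : ∃ m, N.toNat = m + 1 := ⟨N.toNat - 1, by omega⟩
      rw [hm]
      exact pvmod_sum_congr MOD (List.range (bugs + 1).toNat) _ _
        (fun k _ => pvVW A MOD ha0' m M.toNat (k : Int))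
  · have hM0 : M = 0 := by omega
    subst hM0
    show solve N A 0 bugs MOD = solve_alt N A 0 bugs MOD
    exact solve_M0 N A bugs MOD
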